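-- pv_equiv track=rewrite | github.com/chailam/Algorithm | Tasks/movie_buddy_recommendation.py | movieToNum
-- ===== SOURCE A (Python) =====
-- def movieToNum(array):
--     """
--     Assign a unique index to moviename
--     time complexity :worst : O(UK)
--     space complexity : worst :O(UCK+K)
--     argument :array - the sorted list of list which contain userId and its movie names
--     return : movieName - the list of movies
--     """
--     movieName = []
--     compareString = array[0][1]
--     movieName.append(array[0][1])
--     j = 0
--     array[0][1] = j
--     for i in range(1, len(array)):
--         if array[i][1] == compareString:
--             array[i][1] = j
--         else:
--             movieName.append(array[i][1])
--             j += 1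
--             compareString = array[i][1]
--             array[i][1] = j
--     return movieName
-- ===== SOURCE B (Python) =====
-- def movieToNum(array):
--     # Staged rewrite: extract the name column, mark run boundaries by pairwise
--     # comparison of adjacent names, turn the boundary flags into indices by a
--     # running sum for the in-place writes, and build the distinct-name list by
--     # filtering the column on the boundary flags (no compareString state).
--     names = [row[1] for row in array]
--     bumps = [int(cur != prev) for prev, cur in zip(names, names[1:])]
--     j = 0
--     for row, b in zip(array, [0] + bumps):
--         j += b
--         row[1] = j
--     return [names[0]] + [n for n, b in zip(names[1:], bumps) if b]
-- ===== Notes on version B (the rewrite author's own statement) =====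
-- stated objective: alternative
-- what changed: Replaces A's single stateful scan (compareString + running counter j) by staged passes: extract the name column, mark run boundaries via pairwise zip of the column with its shift, prefix-sum the boundary flags for the in-place indices, and filter the column on the flags for the distinct names.
import Mathlib
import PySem

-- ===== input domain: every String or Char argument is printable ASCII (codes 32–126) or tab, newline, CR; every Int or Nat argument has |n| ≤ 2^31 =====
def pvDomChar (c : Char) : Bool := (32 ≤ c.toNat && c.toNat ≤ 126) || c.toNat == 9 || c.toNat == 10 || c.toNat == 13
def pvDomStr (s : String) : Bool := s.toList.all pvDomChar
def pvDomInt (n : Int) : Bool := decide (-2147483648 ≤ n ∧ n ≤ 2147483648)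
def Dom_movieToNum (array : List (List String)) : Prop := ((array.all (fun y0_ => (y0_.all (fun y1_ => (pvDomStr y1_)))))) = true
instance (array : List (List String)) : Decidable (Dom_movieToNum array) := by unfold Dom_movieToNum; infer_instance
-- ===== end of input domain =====

-- B replaces A's single stateful scan (compareString + counter) by staged passes:
-- name column, boundary flags from a pairwise zip with the shifted column, and a
-- filter on the flags (objective: alternative, same O(n) cost).
-- Both Pythons mutate `array` in place identically; this file proves the RETURN
-- value equal (the mutated rows are never read again, so the ports drop the writes).


-- ===== PORT A =====
-- Literal port of A.  State = (movieName, compareString, j); the in-place writes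
-- array[i][1] = j are dropped: they only touch indices already read, never the result.
def movieToNum (array : List (List String)) : List String :=
  let first := PySem.List.pyGetD (PySem.List.pyGetD array 0 []) 1 ""
  let r := (PySem.List.pyRange 1 (PySem.List.len array) 1).foldl
    (fun (st : List String × String × Int) i =>
      let v := PySem.List.pyGetD (PySem.List.pyGetD array i []) 1 ""
      if v == st.2.1 then st
      else (st.1 ++ [v], v, st.2.2 + 1))
    ([first], first, 0)
  r.1

-- ===== PORT B =====
-- Source B step for step: names = column 1; bumps = pairwise "changed" flags from
-- zip(names, names[1:]); the j-accumulation loop only mutates the rows and is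
-- dropped (return value only); result = [names[0]] + flagged entries of names[1:].
def movieToNum_alt (array : List (List String)) : List String :=
  let names := array.map (fun row => PySem.List.pyGetD row 1 "")
  let bumps := (names.zip names.tail).map (fun p => if p.2 == p.1 then (0 : Int) else 1)
  PySem.List.pyGetD names 0 "" ::
    (names.tail.zip bumps).filterMap (fun p => if p.2 ≠ 0 then some p.1 else none)

-- ===== PRECONDITION & SPEC =====
-- Pre_ excludes exactly the inputs where A raises IndexError: the empty list
-- (array[0] fails) and any row shorter than 2 (row[1] fails).
def Pre_movieToNum (array : List (List String)) : Prop :=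
  array ≠ [] ∧ (array.all (fun row => 2 ≤ row.length)) = true
instance (array : List (List String)) : Decidable (Pre_movieToNum array) := by
  unfold Pre_movieToNum; infer_instance

def pvWitness_movieToNum : List (List String) :=
  [["u1", "MovieA"], ["u2", "MovieA"], ["u3", "MovieB"]]

def Spec_movieToNum (array : List (List String)) (out : List String) : Prop := out = movieToNum_alt array
instance (array : List (List String)) (out : List String) : Decidable (Spec_movieToNum array out) := by unfold Spec_movieToNum; infer_instance

-- ===== CLAIM (what is proved, stated in full; the proofs are below) =====
def Claim_equal_movieToNum : Prop := ∀ (array : List (List String)), Dom_movieToNum array → Pre_movieToNum array → Spec_movieToNum array (movieToNum array)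

-- ===== LEMMAS AND PROOFS =====

-- Proof device: the keys of the successive new runs of column 1 after a run keyed c.
def altKey (row : List String) : String := PySem.List.pyGetD row 1 ""

def altRuns (c : String) : List (List String) → List String
  | [] => []
  | r :: rest => if altKey r == c then altRuns c rest else altKey r :: altRuns (altKey r) rest

-- A's loop invariant: folding the remaining rows from state (mn, c, j) returns
-- mn followed by the keys of the new runs after a run keyed c.
theorem foldl_eq_altRuns (rest : List (List String)) :
    ∀ (mn : List String) (c : String) (j : Int),
      (rest.foldl
        (fun (st : List String × String × Int) (row : List String) =>
          let v := altKey row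
          if v == st.2.1 then st else (st.1 ++ [v], v, st.2.2 + 1))
        (mn, c, j)).1 = mn ++ altRuns c rest := by
  induction rest with
  | nil => intro mn c j; simp [altRuns]
  | cons r rest ih =>
    intro mn c j
    simp only [List.foldl_cons, altRuns]
    by_cases h : altKey r = c
    · simpa [h] using ih mn c j
    · simpa [h] using ih (mn ++ [altKey r]) (altKey r) (j + 1)

-- B's zip/filter pipeline computes the same run keys.
theorem zip_filter_eq_altRuns (l : List (List String)) :
    ∀ (c : String),
      ((l.map (fun row => PySem.List.pyGetD row 1 "")).zip
          (((c :: l.map (fun row => PySem.List.pyGetD row 1 "")).zip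
              (l.map (fun row => PySem.List.pyGetD row 1 ""))).map
            (fun p => if p.2 == p.1 then (0 : Int) else 1))).filterMap
        (fun p => if p.2 ≠ 0 then some p.1 else none) = altRuns c l := by
  induction l with
  | nil => intro c; simp [altRuns]
  | cons r t ih =>
    intro c
    simp only [List.map_cons, List.zip_cons_cons, List.filterMap_cons, altRuns, altKey]
    by_cases h : PySem.List.pyGetD r 1 "" = c
    · simpa [altKey, h] using ih c
    · simpa [altKey, h] using ih (PySem.List.pyGetD r 1 "")

-- ===== VERDICT (by name: the statement is the Claim_ definition above) =====
theorem movieToNum_spec : Claim_equal_movieToNum := by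
  intro array _ hpre
  unfold Spec_movieToNum
  obtain ⟨hne, _⟩ := hpre
  obtain ⟨r, rest, rfl⟩ := List.exists_cons_of_ne_nil hne
  simp only [movieToNum, movieToNum_alt]
  rw [PySem.List.foldl_pyRange_pyGetD (r :: rest) []
      (fun (st : List String × String × Int) (row : List String) =>
        let v := PySem.List.pyGetD row 1 ""
        if v == st.2.1 then st else (st.1 ++ [v], v, st.2.2 + 1))
      _ (by norm_num : (0:Int) ≤ 1)]
  have hA := foldl_eq_altRuns rest [altKey r] (altKey r) 0
  have hB := zip_filter_eq_altRuns rest (altKey r)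
  simp only [altKey, PySem.List.pyGetD, beq_iff_eq, ne_eq, ite_not] at hA hB
  simp only [PySem.List.pyGetD, beq_iff_eq, ne_eq, ite_not,
    PySem.List.pyGet?_zero_cons, Option.getD_some, List.map_cons, List.tail_cons,
    Int.toNat_one, List.drop_one]
  rw [hA, hB]
  rfl
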